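-- pv_equiv track=rewrite | github.com/dsharpc/AdventOfCode | 2020/day10.py | connect_adapters
-- ===== SOURCE A (Python) =====
-- def connect_adapters(data):
--     data = sorted(data)
--     last_joltage = 0
--     jump1 = 0
--     jump3 = 1
--     for ad in data:
--         jump = ad - last_joltage
--         if jump == 1:
--             jump1+=1
--         elif jump == 3:
--             jump3+=1
--         last_joltage = ad
--     return jump1 * jump3
-- ===== SOURCE B (Python) =====
-- def connect_adapters(data):
--     if not data:
--         return 0
--     vals = set(data)
--     jump1 = sum(1 for v in vals if v + 1 in vals)
--     jump3 = sum(1 for v in vals if v + 3 in vals and v + 1 not in vals and v + 2 not in vals)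
--     m = min(data)
--     if m == 1:
--         jump1 += 1
--     elif m == 3:
--         jump3 += 1
--     return jump1 * (jump3 + 1)
-- ===== Notes on version B (the rewrite author's own statement) =====
-- stated objective: alternative
-- what changed: B eliminates the sort entirely: it builds a hash set of the adapter values and counts 1-gaps as values v with v+1 in the set and 3-gaps as values v with v+3 in the set but neither v+1 nor v+2, handling the start gap via min(data); A sorts and scans consecutive differences.
import Mathlib
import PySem

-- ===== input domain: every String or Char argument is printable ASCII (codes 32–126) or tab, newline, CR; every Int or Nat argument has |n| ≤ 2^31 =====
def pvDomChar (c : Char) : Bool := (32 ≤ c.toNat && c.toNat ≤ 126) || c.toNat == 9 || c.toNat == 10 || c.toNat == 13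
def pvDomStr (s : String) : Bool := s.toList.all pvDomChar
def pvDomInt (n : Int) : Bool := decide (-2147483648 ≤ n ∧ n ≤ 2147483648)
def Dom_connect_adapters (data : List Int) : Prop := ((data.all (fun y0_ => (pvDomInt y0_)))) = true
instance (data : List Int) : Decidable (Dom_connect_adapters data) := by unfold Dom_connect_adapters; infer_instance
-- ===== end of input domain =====

-- B drops the sort entirely: it counts 1-gaps and 3-gaps of the joltage chain by hash-set
-- membership tests (v+1 in set; v+3 in set with v+1, v+2 absent), plus the start gap from min;
-- alternative algorithm (set membership instead of sort-and-scan).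

-- ===== PORT A =====
def connect_adapters (data : List Int) : Int :=
  let s := PySem.List.sorted data (fun x => x) false
  let st := s.foldl (fun (st : Int × Int × Int) ad =>
    let jump := ad - st.1
    if jump = 1 then (ad, st.2.1 + 1, st.2.2)
    else if jump = 3 then (ad, st.2.1, st.2.2 + 1)
    else (ad, st.2.1, st.2.2)) (0, 0, 1)
  st.2.1 * st.2.2

-- ===== PORT B =====
def connect_adapters_alt (data : List Int) : Int :=
  if data = [] then 0
  else
    let vals : PySem.Set Int := PySem.Set.ofList data
    let jump1 : Int := (vals.countP (fun v => decide (v + 1 ∈ vals)) : Nat)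
    let jump3 : Int :=
      (vals.countP (fun v => decide (v + 3 ∈ vals ∧ v + 1 ∉ vals ∧ v + 2 ∉ vals)) : Nat)
    let m := (PySem.List.min? data (fun x => x)).getD 0
    let jump1 := if m = 1 then jump1 + 1 else jump1
    let jump3 := if m = 1 then jump3 else if m = 3 then jump3 + 1 else jump3
    jump1 * (jump3 + 1)

-- ===== PRECONDITION & SPEC =====
def Spec_connect_adapters (data : List Int) (out : Int) : Prop := out = connect_adapters_alt data
instance (data : List Int) (out : Int) : Decidable (Spec_connect_adapters data out) := by unfold Spec_connect_adapters; infer_instance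

-- ===== CLAIM (what is proved, stated in full; the proofs are below) =====
def Claim_equal_connect_adapters : Prop := ∀ (data : List Int), Dom_connect_adapters data → Spec_connect_adapters data (connect_adapters data)

-- ===== LEMMAS AND PROOFS =====

-- consecutive differences of a list
def listDiffs : List Int → List Int
  | a :: b :: t => (b - a) :: listDiffs (b :: t)
  | _ => []

-- A's fold accumulates the counts of gaps 1 and 3 of the chain last :: l.
theorem connect_adapters_loop (l : List Int) : ∀ (last j1 j3 : Int),
    (l.foldl (fun (st : Int × Int × Int) ad =>
      let jump := ad - st.1
      if jump = 1 then (ad, st.2.1 + 1, st.2.2)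
      else if jump = 3 then (ad, st.2.1, st.2.2 + 1)
      else (ad, st.2.1, st.2.2)) (last, j1, j3)).2
    = (j1 + ((listDiffs (last :: l)).count 1 : Int),
       j3 + ((listDiffs (last :: l)).count 3 : Int)) := by
  induction l with
  | nil => intro last j1 j3; simp [listDiffs]
  | cons a t ih =>
    intro last j1 j3
    simp only [listDiffs, List.foldl_cons, List.count_cons]
    by_cases h1 : a - last = 1
    · simp [h1, ih]; ring_nf
    · by_cases h3 : a - last = 3
      · simp [h3, ih]; ring_nf
      · simp [h1, h3, ih]

-- 1-gaps of a sorted chain are exactly the members v with v+1 a member.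
theorem count1_listDiffs : ∀ (s : List Int), s.Pairwise (· ≤ ·) →
    (listDiffs s).count 1
      = (s.toFinset.filter (fun v => v + 1 ∈ s.toFinset)).card := by
  intro s
  induction s with
  | nil => intro _; simp [listDiffs]
  | cons a t ih =>
    intro hp
    cases t with
    | nil =>
      simp [listDiffs, Finset.filter_singleton]
    | cons b t' =>
      obtain ⟨hhd, hp'⟩ := List.pairwise_cons.mp hp
      have hab : a ≤ b := hhd b (by simp)
      obtain ⟨hhd', _⟩ := List.pairwise_cons.mp hp'
      have hmin : ∀ x ∈ (b :: t').toFinset, b ≤ x := by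
        intro x hx
        simp only [List.mem_toFinset, List.mem_cons] at hx
        rcases hx with rfl | hx
        · exact le_refl x
        · exact hhd' x hx
      by_cases hb : a = b
      · subst hb
        have : (a :: a :: t').toFinset = (a :: t').toFinset := by
          simp [List.toFinset_cons]
        rw [this]
        simpa [listDiffs, List.count_cons] using ih hp'
      · have hlt : a < b := lt_of_le_of_ne hab hb
        have hnot : a ∉ (b :: t').toFinset := by
          intro h
          exact absurd (hmin a h) (not_le.mpr hlt)
        have hTcongr :
            (b :: t').toFinset.filter (fun v => v + 1 ∈ (a :: b :: t').toFinset)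
              = (b :: t').toFinset.filter (fun v => v + 1 ∈ (b :: t').toFinset) := by
          apply Finset.filter_congr
          intro v hv
          have hbv := hmin v hv
          simp only [List.toFinset_cons, Finset.mem_insert]
          constructor
          · rintro (h | h)
            · exfalso; omega
            · exact h
          · intro h; right; exact h
        have hPa : (a + 1 ∈ (a :: b :: t').toFinset) ↔ b - a = 1 := by
          simp only [List.toFinset_cons, Finset.mem_insert]
          constructor
          · rintro (h | h)
            · omega
            · have := hmin (a + 1) (by simpa [List.toFinset_cons] using h)
              omega
          · intro h
            right
            have : a + 1 = b := by omega
            simp [this]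
        have hS : (a :: b :: t').toFinset
            = insert a ((b :: t').toFinset) := by simp [List.toFinset_cons]
        rw [hS] at hTcongr hPa ⊢
        rw [Finset.filter_insert]
        by_cases hg : b - a = 1
        · have hPa' : a + 1 ∈ insert a ((b :: t').toFinset) := hPa.mpr hg
          rw [if_pos hPa']
          rw [Finset.card_insert_of_notMem (by
            intro h
            exact hnot (Finset.mem_of_mem_filter a h))]
          rw [hTcongr]
          simp only [listDiffs, List.count_cons, hg, ih hp']
          simp
        · have hPa' : a + 1 ∉ insert a ((b :: t').toFinset) := fun h => hg (hPa.mp h)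
          rw [if_neg hPa', hTcongr]
          simp only [listDiffs, List.count_cons, ih hp']
          simp [hg]

-- 3-gaps of a sorted chain are exactly the members v with v+3 a member and v+1, v+2 not.
theorem count3_listDiffs : ∀ (s : List Int), s.Pairwise (· ≤ ·) →
    (listDiffs s).count 3
      = (s.toFinset.filter
          (fun v => v + 3 ∈ s.toFinset ∧ v + 1 ∉ s.toFinset ∧ v + 2 ∉ s.toFinset)).card := by
  intro s
  induction s with
  | nil => intro _; simp [listDiffs]
  | cons a t ih =>
    intro hp
    cases t with
    | nil =>
      simp [listDiffs, Finset.filter_singleton]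
    | cons b t' =>
      obtain ⟨hhd, hp'⟩ := List.pairwise_cons.mp hp
      have hab : a ≤ b := hhd b (by simp)
      obtain ⟨hhd', _⟩ := List.pairwise_cons.mp hp'
      have hmin : ∀ x ∈ (b :: t').toFinset, b ≤ x := by
        intro x hx
        simp only [List.mem_toFinset, List.mem_cons] at hx
        rcases hx with rfl | hx
        · exact le_refl x
        · exact hhd' x hx
      by_cases hb : a = b
      · subst hb
        have : (a :: a :: t').toFinset = (a :: t').toFinset := by
          simp [List.toFinset_cons]
        rw [this]
        simpa [listDiffs, List.count_cons] using ih hp'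
      · have hlt : a < b := lt_of_le_of_ne hab hb
        have hnot : a ∉ (b :: t').toFinset := by
          intro h
          exact absurd (hmin a h) (not_le.mpr hlt)
        have hbmem : b ∈ (b :: t').toFinset := by simp
        have hmemS : ∀ k : Int, 0 < k →
            ((a + k ∈ (a :: b :: t').toFinset) ↔ a + k ∈ (b :: t').toFinset) := by
          intro k hk
          simp only [List.toFinset_cons, Finset.mem_insert]
          constructor
          · rintro (h | h)
            · exfalso; omega
            · exact h
          · intro h; right; exact h
        have hTcongr :
            (b :: t').toFinset.filter (fun v =>
                v + 3 ∈ (a :: b :: t').toFinset ∧ v + 1 ∉ (a :: b :: t').toFinset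
                  ∧ v + 2 ∉ (a :: b :: t').toFinset)
              = (b :: t').toFinset.filter (fun v =>
                v + 3 ∈ (b :: t').toFinset ∧ v + 1 ∉ (b :: t').toFinset
                  ∧ v + 2 ∉ (b :: t').toFinset) := by
          apply Finset.filter_congr
          intro v hv
          have hbv := hmin v hv
          have e3 : (v + 3 ∈ (a :: b :: t').toFinset) ↔ v + 3 ∈ (b :: t').toFinset := by
            simp only [List.toFinset_cons, Finset.mem_insert]
            constructor
            · rintro (h | h); · exfalso; omega
              · exact h
            · intro h; right; exact h
          have e1 : (v + 1 ∈ (a :: b :: t').toFinset) ↔ v + 1 ∈ (b :: t').toFinset := by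
            simp only [List.toFinset_cons, Finset.mem_insert]
            constructor
            · rintro (h | h); · exfalso; omega
              · exact h
            · intro h; right; exact h
          have e2 : (v + 2 ∈ (a :: b :: t').toFinset) ↔ v + 2 ∈ (b :: t').toFinset := by
            simp only [List.toFinset_cons, Finset.mem_insert]
            constructor
            · rintro (h | h); · exfalso; omega
              · exact h
            · intro h; right; exact h
          rw [e1, e2, e3]
        have hPa : (a + 3 ∈ (a :: b :: t').toFinset ∧ a + 1 ∉ (a :: b :: t').toFinset
              ∧ a + 2 ∉ (a :: b :: t').toFinset) ↔ b - a = 3 := by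
          rw [hmemS 3 (by omega), hmemS 1 (by omega), hmemS 2 (by omega)]
          constructor
          · rintro ⟨h3, h1, h2⟩
            have hb3 := hmin _ h3
            by_contra hne
            have hble : b ≤ a + 2 := by omega
            have : b = a + 1 ∨ b = a + 2 := by omega
            rcases this with rfl | rfl
            · exact h1 hbmem
            · exact h2 hbmem
          · intro h
            have hb3 : a + 3 = b := by omega
            refine ⟨by rw [hb3]; exact hbmem, ?_, ?_⟩
            · intro h1; have := hmin _ h1; omega
            · intro h2; have := hmin _ h2; omega
        have hS : (a :: b :: t').toFinset
            = insert a ((b :: t').toFinset) := by simp [List.toFinset_cons]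
        rw [hS] at hTcongr hPa ⊢
        rw [Finset.filter_insert]
        by_cases hg : b - a = 3
        · rw [if_pos (hPa.mpr hg)]
          rw [Finset.card_insert_of_notMem (by
            intro h
            exact hnot (Finset.mem_of_mem_filter a h))]
          rw [hTcongr]
          simp only [listDiffs, List.count_cons, hg, ih hp']
          simp
        · rw [if_neg (fun h => hg (hPa.mp h)), hTcongr]
          simp only [listDiffs, List.count_cons, ih hp']
          simp [hg]

-- countP over a duplicate-free list is a Finset filter-card.
theorem countP_eq_card_filter {u : List Int} (hu : u.Nodup) (p : Int → Bool) :
    u.countP p = (u.toFinset.filter (fun v => p v = true)).card := by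
  classical
  have hnod : (u.filter p).Nodup := hu.filter p
  rw [List.countP_eq_length_filter, ← List.toFinset_card_of_nodup hnod, List.toFinset_filter]

theorem connect_adapters_spec : Claim_equal_connect_adapters := by
  intro data _
  unfold Spec_connect_adapters connect_adapters connect_adapters_alt
  dsimp only
  by_cases hnil : data = []
  · subst hnil; simp [PySem.List.sorted]
  · rw [if_neg hnil]
    set s := PySem.List.sorted data (fun x => x) false with hs
    have hsnil : s ≠ [] := by
      intro h
      exact hnil (by rwa [PySem.List.sorted_eq_nil_iff] at h)
    obtain ⟨m, rest, hcons⟩ := List.exists_cons_of_ne_nil hsnil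
    -- sorted chain facts
    have hpair : s.Pairwise (· ≤ ·) := by
      simpa using PySem.List.sorted_pairwise data (fun x => x)
    have hperm : s.Perm data := PySem.List.sorted_perm data (fun x => x) false
    have hfs : s.toFinset = data.toFinset := by
      ext x; simp [hperm.mem_iff]
    -- the minimum of data is the head of s
    have hmins : ∀ y ∈ data, m ≤ y := by
      intro y hy
      simpa using PySem.List.key_head_sorted_le data (fun x : Int => x)
        (m := m) (t := rest) (by rw [← hs, hcons]) y hy
    have hmmem : m ∈ data := hperm.mem_iff.mp (by simp [hcons])
    obtain ⟨mb, hmb⟩ : ∃ mb, PySem.List.min? data (fun x => x) = some mb := by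
      cases h : PySem.List.min? data (fun x : Int => x) with
      | none => exact absurd ((PySem.List.min?_eq_none_iff _ _).mp h) hnil
      | some mb => exact ⟨mb, rfl⟩
    have hmbm : mb = m := by
      have h1 : mb ∈ data := PySem.List.min?_mem hmb
      have h2 : ∀ y ∈ data, mb ≤ y := by
        intro y hy
        simpa using PySem.List.min?_isMin hmb y hy
      exact le_antisymm (h2 m hmmem) (hmins mb h1)
    -- A's loop result via listDiffs of 0 :: s
    rw [connect_adapters_loop]
    have hdiff0 : listDiffs (0 :: s) = (m - 0) :: listDiffs s := by
      rw [hcons]; rfl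
    -- B's set facts
    have hvalsfin : (PySem.Set.ofList data).toFinset = s.toFinset := by
      rw [hfs]
      apply Finset.ext
      intro x
      simp [PySem.Set.mem_ofList]
    have hnodup : (PySem.Set.ofList data).Nodup := PySem.Set.nodup_ofList data
    have hmem : ∀ x : Int, (x ∈ PySem.Set.ofList data) ↔ x ∈ s.toFinset := by
      intro x
      rw [← hvalsfin]
      simp
    -- rewrite B's counts
    have hc1 : ((PySem.Set.ofList data).countP
          (fun v => decide (v + 1 ∈ PySem.Set.ofList data)) : Nat)
        = (s.toFinset.filter (fun v => v + 1 ∈ s.toFinset)).card := by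
      rw [countP_eq_card_filter hnodup]
      rw [hvalsfin]
      apply Finset.card_nbij id (by intro x hx; simpa [hmem] using hx)
        (Set.injOn_id _)
      · intro x hx
        simp only [Finset.coe_filter, Set.mem_setOf_eq] at hx ⊢
        refine ⟨x, ⟨hx.1, by simpa [hmem] using hx.2⟩, rfl⟩
    have hc3 : ((PySem.Set.ofList data).countP
          (fun v => decide (v + 3 ∈ PySem.Set.ofList data ∧ v + 1 ∉ PySem.Set.ofList data
            ∧ v + 2 ∉ PySem.Set.ofList data)) : Nat)
        = (s.toFinset.filter (fun v => v + 3 ∈ s.toFinset ∧ v + 1 ∉ s.toFinset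
            ∧ v + 2 ∉ s.toFinset)).card := by
      rw [countP_eq_card_filter hnodup]
      rw [hvalsfin]
      apply Finset.card_nbij id
        (by intro x hx
            simp only [Finset.coe_filter, Set.mem_setOf_eq, decide_eq_true_eq] at hx ⊢
            exact ⟨hx.1, by simpa [hmem] using hx.2⟩)
        (Set.injOn_id _)
      · intro x hx
        simp only [Finset.coe_filter, Set.mem_setOf_eq, decide_eq_true_eq] at hx ⊢
        refine ⟨x, ⟨hx.1, by simpa [hmem] using hx.2⟩, rfl⟩
    -- assemble
    rw [hmb]
    simp only [Option.getD_some, hmbm]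
    rw [hc1, hc3, hdiff0]
    rw [← count1_listDiffs s hpair, ← count3_listDiffs s hpair]
    simp only [List.count_cons]
    simp only [beq_iff_eq]
    by_cases hm1 : m = 1
    · subst hm1
      simp only [show (((1:ℤ)-0=1)) ↔ True from by norm_num,
        show (((1:ℤ)-0=3)) ↔ False from by norm_num,
        show (((1:ℤ)=3)) ↔ False from by norm_num, if_true, if_false]
      push_cast
      ring
    · by_cases hm3 : m = 3
      · subst hm3
        simp only [show (((3:ℤ)-0=1)) ↔ False from by norm_num,
          show (((3:ℤ)-0=3)) ↔ True from by norm_num,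
          show (((3:ℤ)=1)) ↔ False from by norm_num, if_true, if_false]
        push_cast
        ring
      · have e1 : ¬ ((m : ℤ) - 0 = 1) := by omega
        have e3 : ¬ ((m : ℤ) - 0 = 3) := by omega
        simp only [if_neg hm1, if_neg hm3, if_neg e1, if_neg e3]
        push_cast
        ring
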